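-- pv_equiv track=rewrite | github.com/linhdvu14/cp-sols | sols/CodeForces/1670_d2/B_Dorms_War.py | solve
-- ===== SOURCE A (Python) =====
-- def solve(N, S, specials):
--     specials = set(specials)
--
--     # max dist from any char to the next special char
--     mx = i = 0
--     while i < N:
--         j = i + 1
--         while j < N:
--             if S[j] in specials:
--                 mx = max(mx, j-i)
--                 break
--             j += 1
--         i = j
--
--     return mx
-- ===== SOURCE B (Python) =====
-- def solve(N, S, specials):
--     specials = set(specials)
--     positions = [0] + [i for i in range(1, N) if S[i] in specials]
--     return max((b - a for a, b in zip(positions, positions[1:])), default=0)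
-- ===== Notes on version B (the rewrite author's own statement) =====
-- stated objective: simpler
-- what changed: Replaced A's nested pointer-advancing while-loops with a two-phase computation: build the list [0] + special positions in one comprehension, then return the max of consecutive pairwise differences (default 0).
import Mathlib
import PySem

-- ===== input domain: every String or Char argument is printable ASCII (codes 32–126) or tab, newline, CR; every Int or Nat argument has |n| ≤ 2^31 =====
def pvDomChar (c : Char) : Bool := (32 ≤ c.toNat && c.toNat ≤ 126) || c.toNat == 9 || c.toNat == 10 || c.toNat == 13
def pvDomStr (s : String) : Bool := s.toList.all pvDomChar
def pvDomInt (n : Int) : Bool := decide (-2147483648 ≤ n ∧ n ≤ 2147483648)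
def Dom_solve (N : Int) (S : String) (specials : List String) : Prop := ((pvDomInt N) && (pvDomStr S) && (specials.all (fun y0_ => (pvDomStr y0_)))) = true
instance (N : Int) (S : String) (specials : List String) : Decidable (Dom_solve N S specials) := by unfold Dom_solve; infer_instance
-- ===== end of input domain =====

-- B builds the list of special positions once and takes the max pairwise gap, replacing
-- A's nested pointer-advancing while-loops (objective: simpler two-phase decomposition).

-- ===== PORT A =====
-- S[j] in specials (set membership; out-of-range index yields false — those inputs are outside Pre_)
def solveIsSpec (S : String) (sp : PySem.Set String) (j : Int) : Bool :=
  match PySem.Str.pyGet? S j with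
  | some c => sp.contains (String.ofList [c])
  | none => false

-- inner 'while j < N' loop: returns (final j, whether it broke at a special position)
def solveFind (S : String) (sp : PySem.Set String) (N j : Int) : Int × Bool :=
  if j < N then
    if solveIsSpec S sp j then (j, true) else solveFind S sp N (j + 1)
  else (j, false)
  termination_by (N - j).toNat
  decreasing_by omega

theorem solveFind_ge (S : String) (sp : PySem.Set String) (N j : Int) :
    j ≤ (solveFind S sp N j).1 := by
  fun_induction solveFind S sp N j with
  | case1 => simp
  | case2 _ _ _ ih => omega
  | case3 => simp

-- outer 'while i < N' loop carrying (mx, i)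
def solveLoop (S : String) (sp : PySem.Set String) (N mx i : Int) : Int :=
  if i < N then
    let r := solveFind S sp N (i + 1)
    solveLoop S sp N (if r.2 then max mx (r.1 - i) else mx) r.1
  else mx
  termination_by (N - i).toNat
  decreasing_by
    have := solveFind_ge S sp N (i + 1)
    omega

def solve (N : Int) (S : String) (specials : List String) : Int :=
  let sp := PySem.Set.ofList specials
  solveLoop S sp N 0 0

-- ===== PORT B =====
-- positions = [0] + [i for i in range(1, N) if S[i] in specials]
def solveAltPositions (N : Int) (S : String) (sp : PySem.Set String) : List Int :=
  0 :: (PySem.List.pyRange 1 N 1).filter (fun i =>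
    match PySem.Str.pyGet? S i with
    | some c => sp.contains (String.ofList [c])
    | none => false)

def solve_alt (N : Int) (S : String) (specials : List String) : Int :=
  let sp := PySem.Set.ofList specials
  let positions := solveAltPositions N S sp
  match (positions.zip positions.tail).map (fun p => p.2 - p.1) with
  | [] => 0
  | g :: gs => gs.foldl max g

-- ===== PRECONDITION & SPEC =====
-- Pre_ excludes exactly the inputs where A raises IndexError: N ≥ 2 together with N > len(S)
-- makes A index S[j] for some j ≥ len(S).
def Pre_solve (N : Int) (S : String) (specials : List String) : Prop :=
  N ≤ (S.toList.length : Int) ∨ N ≤ 1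
instance (N : Int) (S : String) (specials : List String) : Decidable (Pre_solve N S specials) := by
  unfold Pre_solve; infer_instance

def pvWitness_solve : Int × String × List String := (3, "aba", ["b"])

def Spec_solve (N : Int) (S : String) (specials : List String) (out : Int) : Prop := out = solve_alt N S specials
instance (N : Int) (S : String) (specials : List String) (out : Int) : Decidable (Spec_solve N S specials out) := by unfold Spec_solve; infer_instance

-- ===== CLAIM (what is proved, stated in full; the proofs are below) =====
def Claim_equal_solve : Prop := ∀ (N : Int) (S : String) (specials : List String), Dom_solve N S specials → Pre_solve N S specials → Spec_solve N S specials (solve N S specials)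

-- ===== LEMMAS AND PROOFS =====

-- gaps between consecutive entries of i :: l
def pvGaps (i : Int) (l : List Int) : List Int :=
  match l with
  | [] => []
  | p :: ps => (p - i) :: pvGaps p ps

theorem pvGaps_zip (i : Int) (l : List Int) :
    (((i :: l).zip l).map (fun p => p.2 - p.1)) = pvGaps i l := by
  induction l generalizing i with
  | nil => rfl
  | cons p ps ih => simp [pvGaps, ih]

theorem solveFind_of_filter_nil (S : String) (sp : PySem.Set String) (N j : Int)
    (hj : j ≤ N)
    (h : (PySem.List.pyRange j N 1).filter (solveIsSpec S sp) = []) :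
    solveFind S sp N j = (N, false) := by
  fun_induction solveFind S sp N j with
  | case1 j hlt hspec =>
    rw [PySem.List.pyRange_one_cons hlt, List.filter_cons, if_pos hspec] at h
    cases h
  | case2 j hlt hspec ih =>
    rw [PySem.List.pyRange_one_cons hlt, List.filter_cons,
      if_neg (by simp [hspec])] at h
    exact ih (by omega) h
  | case3 j hlt =>
    have : j = N := by omega
    simp [this]

theorem solveFind_of_filter_cons (S : String) (sp : PySem.Set String) (N j p : Int)
    (ps : List Int)
    (h : (PySem.List.pyRange j N 1).filter (solveIsSpec S sp) = p :: ps) :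
    solveFind S sp N j = (p, true) := by
  fun_induction solveFind S sp N j with
  | case1 j hlt hspec =>
    rw [PySem.List.pyRange_one_cons hlt, List.filter_cons, if_pos hspec] at h
    rw [(List.cons.inj h).1]
  | case2 j hlt hspec ih =>
    rw [PySem.List.pyRange_one_cons hlt, List.filter_cons,
      if_neg (by simp [hspec])] at h
    exact ih h
  | case3 j hlt =>
    rw [PySem.List.pyRange_one_eq_nil (by omega)] at h
    simp at h

theorem filter_range_step (S : String) (sp : PySem.Set String) (N j p : Int)
    (ps : List Int)
    (h : (PySem.List.pyRange j N 1).filter (solveIsSpec S sp) = p :: ps) :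
    j ≤ p ∧ p < N ∧ (PySem.List.pyRange (p + 1) N 1).filter (solveIsSpec S sp) = ps := by
  have hpmem : p ∈ (PySem.List.pyRange j N 1).filter (solveIsSpec S sp) := by
    rw [h]; exact List.mem_cons_self
  have hpr : p ∈ PySem.List.pyRange j N 1 := List.mem_of_mem_filter hpmem
  have hspecp : solveIsSpec S sp p = true := List.of_mem_filter hpmem
  have hbounds : j ≤ p ∧ p < N := (PySem.List.mem_pyRange_one).1 hpr
  obtain ⟨hjp, hpN⟩ := hbounds
  have hsplit : PySem.List.pyRange j N 1 =
      PySem.List.pyRange j (p + 1) 1 ++ PySem.List.pyRange (p + 1) N 1 :=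
    PySem.List.pyRange_one_append j (p + 1) N (by omega) (by omega)
  rw [hsplit, List.filter_append] at h
  -- the first block's filter is exactly [p]
  have hpw : ((PySem.List.pyRange j (p+1) 1).filter (solveIsSpec S sp)).Pairwise (· < ·) :=
    List.Pairwise.filter _ (PySem.List.pairwise_lt_pyRange_one j (p+1))
  have hle : ∀ x ∈ (PySem.List.pyRange j (p+1) 1).filter (solveIsSpec S sp), x ≤ p := by
    intro x hx
    have := (PySem.List.mem_pyRange_one).1 (List.mem_of_mem_filter hx)
    omega
  have hpin : p ∈ (PySem.List.pyRange j (p+1) 1).filter (solveIsSpec S sp) := by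
    refine List.mem_filter.2 ⟨(PySem.List.mem_pyRange_one).2 ⟨hjp, by omega⟩, hspecp⟩
  match hF : (PySem.List.pyRange j (p+1) 1).filter (solveIsSpec S sp) with
  | [] => rw [hF] at hpin; simp at hpin
  | q :: qs =>
    rw [hF] at h hpw hle hpin
    have hq : q = p := by
      have := List.cons.injEq q (qs ++ (PySem.List.pyRange (p + 1) N 1).filter (solveIsSpec S sp)) p ps
      rw [List.cons_append] at h
      exact (List.cons.inj h).1
    subst hq
    have hqs : qs = [] := by
      match qs with
      | [] => rfl
      | r :: rs =>
        have hrp : q < r := (List.pairwise_cons.1 hpw).1 r List.mem_cons_self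
        have := hle r (by simp)
        omega
    subst hqs
    rw [List.cons_append, List.nil_append] at h
    exact ⟨hjp, hpN, (List.cons.inj h).2⟩

theorem solveLoop_eq_foldl (S : String) (sp : PySem.Set String) (N : Int) :
    ∀ i mx, i ≤ N →
      solveLoop S sp N mx i =
        List.foldl max mx (pvGaps i ((PySem.List.pyRange (i+1) N 1).filter (solveIsSpec S sp))) := by
  intro i mx hiN
  induction hm : (N - i).toNat using Nat.strong_induction_on generalizing i mx with
  | _ n ih =>
  subst hm
  by_cases hlt : i < N
  · rw [solveLoop]
    simp only [hlt, if_true]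
    match hF : (PySem.List.pyRange (i+1) N 1).filter (solveIsSpec S sp) with
    | [] =>
      rw [solveFind_of_filter_nil S sp N (i+1) (by omega) hF]
      simp [pvGaps]
      rw [solveLoop]
      simp
    | p :: ps =>
      rw [solveFind_of_filter_cons S sp N (i+1) p ps hF]
      obtain ⟨hip, hpN, hps⟩ := filter_range_step S sp N (i+1) p ps hF
      simp only [pvGaps, List.foldl_cons, ite_true]
      rw [ih (N - p).toNat (by omega) p (max mx (p - i)) (by omega) rfl, hps]
  · rw [solveLoop]
    have : i = N := by omega
    simp [this, PySem.List.pyRange_one_eq_nil (show N ≤ N + 1 by omega), pvGaps]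

theorem foldl_max_zero (g : Int) (gs : List Int) (hg : 0 ≤ g) :
    List.foldl max 0 (g :: gs) = List.foldl max g gs := by
  simp [List.foldl_cons, max_eq_right hg]

theorem solve_alt_eq_foldl (N : Int) (S : String) (specials : List String) :
    solve_alt N S specials =
      List.foldl max 0 (pvGaps 0 ((PySem.List.pyRange 1 N 1).filter
        (solveIsSpec S (PySem.Set.ofList specials)))) := by
  unfold solve_alt solveAltPositions
  show (match List.map (fun p => p.2 - p.1)
      ((0 :: (PySem.List.pyRange 1 N 1).filter (solveIsSpec S (PySem.Set.ofList specials))).zip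
        ((PySem.List.pyRange 1 N 1).filter (solveIsSpec S (PySem.Set.ofList specials)))) with
    | [] => 0
    | g :: gs => List.foldl max g gs) = _
  match hF : (PySem.List.pyRange 1 N 1).filter (solveIsSpec S (PySem.Set.ofList specials)) with
  | [] => simp [pvGaps]
  | p :: ps =>
    have hp1 : (1 : Int) ≤ p := by
      have hpmem := List.mem_of_mem_filter (hF ▸ (List.mem_cons_self : p ∈ p :: ps))
      have := (PySem.List.mem_pyRange_one).1 hpmem
      omega
    rw [pvGaps_zip 0 (p :: ps)]
    simp only [pvGaps]
    rw [foldl_max_zero (p - 0) (pvGaps p ps) (by omega)]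

-- ===== VERDICT (by name: the statement is the Claim_ definition above) =====
theorem solve_spec : Claim_equal_solve := by
  intro N S specials _ _
  unfold Spec_solve
  rw [solve_alt_eq_foldl]
  unfold solve
  by_cases hN : 0 ≤ N
  · rw [solveLoop_eq_foldl S (PySem.Set.ofList specials) N 0 0 hN]
    norm_num
  · rw [solveLoop]
    have h1 : ¬ (0 : Int) < N := by omega
    have h2 : PySem.List.pyRange 1 N 1 = [] := PySem.List.pyRange_one_eq_nil (by omega)
    simp [h1, h2, pvGaps]
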